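-- pv_equiv track=rewrite | github.com/xuetingandyang/leetcode | quoraOA/frameGenerator.py | frameGenerator
-- ===== SOURCE A (Python) =====
-- from typing import List
--
-- def frameGenerator(n:int) -> List[List[bool]]:
--     if n == 1:
--         return [[True]]
--
--     frame = [[False for i in range(n)] for j in range(n)]
--     # for i in range(n):
--     # frame[0], frame[n-1] = [True] * n, [True] * n
--
--     for i in range(n):
--         for j in range(n):
--             if i == 0 or i == n-1 or j == 0 or j == n-1:
--                 frame[i][j] = True
--     return frame
-- ===== SOURCE B (Python) =====
-- def frameGenerator(n):
--     full = [True] * n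
--     return [full[:] if i == 0 or i == n - 1 else [True] + [False] * (n - 2) + [True]
--             for i in range(n)]
-- ===== Notes on version B (the rewrite author's own statement) =====
-- stated objective: simpler
-- what changed: Builds each row directly (all-True border rows, True/False.../True middle rows) in one comprehension instead of creating an all-False grid and mutating every cell in a nested scan with a per-cell border test, and needs no special-cased branch.
import Mathlib
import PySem

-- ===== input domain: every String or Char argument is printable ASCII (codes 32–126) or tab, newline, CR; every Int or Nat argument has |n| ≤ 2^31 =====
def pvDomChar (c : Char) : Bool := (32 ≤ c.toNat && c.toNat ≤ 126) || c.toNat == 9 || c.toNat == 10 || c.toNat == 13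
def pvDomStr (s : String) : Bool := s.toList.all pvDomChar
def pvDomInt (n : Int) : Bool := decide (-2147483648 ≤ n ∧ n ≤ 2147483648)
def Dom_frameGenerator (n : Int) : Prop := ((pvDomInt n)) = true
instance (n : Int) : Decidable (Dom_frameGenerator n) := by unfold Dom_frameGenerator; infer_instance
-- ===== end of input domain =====

-- B builds each row directly (border rows all-True, middle rows True/False…/True) instead of
-- mutating an all-False grid cell by cell with a per-cell border test (objective: simpler).

-- ===== PORT A =====
def frameGenerator (n : Int) : List (List Bool) :=
  if n == 1 then [[true]]
  else
    let frame : List (List Bool) :=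
      (PySem.List.pyRange 0 n 1).map (fun _j => (PySem.List.pyRange 0 n 1).map (fun _i => false))
    (PySem.List.pyRange 0 n 1).foldl (fun fr i =>
      (PySem.List.pyRange 0 n 1).foldl (fun fr2 j =>
        if i == 0 || i == n - 1 || j == 0 || j == n - 1 then
          PySem.List.pySetD fr2 i (PySem.List.pySetD (PySem.List.pyGetD fr2 i []) j true)
        else fr2) fr) frame

-- ===== PORT B =====
def frameGenerator_alt (n : Int) : List (List Bool) :=
  let full := List.replicate n.toNat true
  (PySem.List.pyRange 0 n 1).map (fun i =>
    if i == 0 || i == n - 1 then full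
    else [true] ++ List.replicate (n - 2).toNat false ++ [true])

-- ===== PRECONDITION & SPEC =====
def Spec_frameGenerator (n : Int) (out : List (List Bool)) : Prop := out = frameGenerator_alt n
instance (n : Int) (out : List (List Bool)) : Decidable (Spec_frameGenerator n out) := by unfold Spec_frameGenerator; infer_instance

-- ===== CLAIM (what is proved, stated in full; the proofs are below) =====
def Claim_equal_frameGenerator : Prop := ∀ (n : Int), Dom_frameGenerator n → Spec_frameGenerator n (frameGenerator n)

-- ===== LEMMAS AND PROOFS =====

-- the border test of A, at Nat indices, for grid size N
def pvC (N i j : Nat) : Bool :=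
  ((i : Int) == 0 || (i : Int) == (N : Int) - 1 || (j : Int) == 0 || (j : Int) == (N : Int) - 1)

-- A's finished row i
def pvRow (N i : Nat) : List Bool := (List.range N).map (fun j => pvC N i j)

-- inner row fold: setting every border cell of row i, processed up to column m
lemma row_fold (N i m : Nat) (hm : m ≤ N) :
    (List.range m).foldl (fun r j => if pvC N i j then r.set j true else r) (List.replicate N false)
      = (List.range N).map (fun j => if j < m then pvC N i j else false) := by
  induction m with
  | zero => apply List.ext_getElem <;> simp
  | succ m ih =>
    rw [List.range_succ, List.foldl_append, ih (by omega)]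
    simp only [List.foldl_cons, List.foldl_nil]
    by_cases h : pvC N i m = true
    · rw [if_pos h]
      apply List.ext_getElem
      · simp
      · intro k hk1 hk2
        have hkN : k < N := by simpa using hk2
        rw [List.getElem_set]
        by_cases hkm : m = k
        · subst hkm
          simp [h, List.getElem_map]
        · simp only [hkm, if_false, List.getElem_map, List.getElem_range]
          by_cases hlt : k < m
          · simp [hlt, show k < m + 1 by omega]
          · simp [hlt, show ¬ k < m + 1 by omega]
    · rw [if_neg h]
      apply List.ext_getElem
      · simp
      · intro k hk1 hk2
        simp only [List.getElem_map, List.getElem_range]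
        by_cases hkm : k = m
        · subst hkm
          simp only [Bool.not_eq_true] at h
          simp [h]
        · by_cases hlt : k < m
          · simp [hlt, show k < m + 1 by omega]
          · simp [hlt, show ¬ k < m + 1 by omega]

-- inner frame fold only rewrites row i
lemma inner_fold (N i : Nat) (js : List Nat) (fr : List (List Bool)) (hi : i < fr.length) :
    js.foldl (fun fr2 j => if pvC N i j then fr2.set i ((fr2.getD i []).set j true) else fr2) fr
      = fr.set i (js.foldl (fun r j => if pvC N i j then r.set j true else r) (fr.getD i [])) := by
  induction js generalizing fr with
  | nil =>
    simp only [List.foldl_nil]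
    rw [List.getD_eq_getElem _ _ hi, List.set_getElem_self]
  | cons j js ih =>
    simp only [List.foldl_cons]
    by_cases h : pvC N i j = true
    · rw [if_pos h, if_pos h]
      rw [ih _ (by simpa using hi)]
      rw [List.set_set]
      congr 1
      rw [List.getD_eq_getElem _ _ (by simpa using hi), List.getElem_set_self,
        List.getD_eq_getElem _ _ hi]
    · rw [if_neg h, if_neg h]
      exact ih fr hi

-- outer fold up to row m
lemma outer_fold (N m : Nat) (hm : m ≤ N) :
    (List.range m).foldl
        (fun fr i => (List.range N).foldl
          (fun fr2 j => if pvC N i j then fr2.set i ((fr2.getD i []).set j true) else fr2) fr)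
        ((List.range N).map (fun _ => List.replicate N false))
      = (List.range N).map (fun i => if i < m then pvRow N i else List.replicate N false) := by
  induction m with
  | zero => apply List.ext_getElem <;> simp
  | succ m ih =>
    rw [List.range_succ, List.foldl_append, ih (by omega)]
    simp only [List.foldl_cons, List.foldl_nil]
    have hmlen : m < ((List.range N).map
        (fun i => if i < m then pvRow N i else List.replicate N false)).length := by
      simp only [List.length_map, List.length_range]; omega
    rw [inner_fold N m _ _ hmlen]
    have hget : ((List.range N).map (fun i => if i < m then pvRow N i else List.replicate N false)).getD m []
        = List.replicate N false := by
      rw [List.getD_eq_getElem _ _ hmlen]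
      simp
    rw [hget, row_fold N m N (le_refl N)]
    apply List.ext_getElem
    · simp
    · intro k hk1 hk2
      have hkN : k < N := by simpa using hk2
      rw [List.getElem_set]
      by_cases hkm : m = k
      · subst hkm
        simp only [List.getElem_map, List.getElem_range,
          if_pos (Nat.lt_succ_self m), pvRow]
        apply List.map_congr_left
        intro j hj
        rw [if_pos (List.mem_range.mp hj)]
      · simp only [hkm, if_false, List.getElem_map, List.getElem_range]
        by_cases hlt : k < m
        · simp [hlt, show k < m + 1 by omega]
        · simp [hlt, show ¬ k < m + 1 by omega]

lemma pyRange_zero_cast (N : Nat) :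
    PySem.List.pyRange 0 (N : Int) 1 = (List.range N).map (fun (k : Nat) => (k : Int)) := by
  rw [PySem.List.pyRange_one]
  simp only [sub_zero, Int.toNat_natCast, zero_add]

-- B's row for a middle index equals A's finished row
lemma mid_row (N i : Nat) (hN : 2 ≤ N) (hi0 : i ≠ 0) (hiN : (i : Int) ≠ (N : Int) - 1) :
    pvRow N i = [true] ++ List.replicate (N - 2) false ++ [true] := by
  apply List.ext_getElem
  · simp [pvRow]; omega
  · intro k hk1 hk2
    have hkN : k < N := by simpa [pvRow] using hk1
    simp only [pvRow, List.getElem_map, List.getElem_range]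
    by_cases hk0 : k = 0
    · subst hk0
      simp [pvC]
    · by_cases hkL : k = N - 1
      · rw [List.getElem_append_right (by simp; omega)]
        have hpv : pvC N i k = true := by
          simp only [pvC, beq_iff_eq, Bool.or_eq_true]
          omega
        rw [hpv]
        simp
      · rw [List.getElem_append_left (by simp; omega),
          List.getElem_append_right (by simp; omega)]
        have hpv : pvC N i k = false := by
          simp only [pvC, Bool.or_eq_false_iff, beq_eq_false_iff_ne, ne_eq]
          omega
        rw [hpv]
        simp

-- A's finished border row is all True
lemma border_row (N i : Nat) (hb : (i : Int) = 0 ∨ (i : Int) = (N : Int) - 1) :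
    pvRow N i = List.replicate N true := by
  apply List.ext_getElem
  · simp [pvRow]
  · intro k hk1 hk2
    have hkN : k < N := by simpa [pvRow] using hk1
    simp only [pvRow, List.getElem_map, List.getElem_range, List.getElem_replicate]
    rcases hb with h | h <;> simp [pvC, h]

-- ===== VERDICT (by name: the statement is the Claim_ definition above) =====
theorem frameGenerator_spec : Claim_equal_frameGenerator := by
  intro n _
  show frameGenerator n = frameGenerator_alt n
  by_cases hle : n ≤ 0
  · have hr : PySem.List.pyRange 0 n 1 = [] := PySem.List.pyRange_one_eq_nil (by omega)
    have h1 : n ≠ 1 := by omega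
    simp [frameGenerator, frameGenerator_alt, hr, h1]
  · by_cases h1 : n = 1
    · subst h1; decide
    · have hn2 : 2 ≤ n := by omega
      obtain ⟨N, rfl⟩ : ∃ N : Nat, n = (N : Int) := ⟨n.toNat, (Int.toNat_of_nonneg (by omega)).symm⟩
      have hN : 2 ≤ N := by exact_mod_cast hn2
      rw [frameGenerator, frameGenerator_alt, if_neg (by simp; omega : ¬ (((N : Int) == 1) = true))]
      rw [pyRange_zero_cast]
      simp only [List.foldl_map, List.map_map, Function.comp_def,
        PySem.List.pySetD_natCast, PySem.List.pyGetD_natCast,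
        List.map_const', List.length_range, Int.toNat_natCast]
      have hof := outer_fold N N (le_refl N)
      unfold pvC at hof
      simp only [List.map_const', List.length_range] at hof
      rw [hof]
      have h2 : ((N : Int) - 2).toNat = N - 2 := by omega
      rw [h2]
      apply List.map_congr_left
      intro i hi
      rw [if_pos (List.mem_range.mp hi)]
      by_cases hb : ((i : Int) = 0 ∨ (i : Int) = (N : Int) - 1)
      · rw [if_pos (by simp only [Bool.or_eq_true, beq_iff_eq]; tauto)]
        exact border_row N i hb
      · push Not at hb
        rw [if_neg (by simp only [Bool.or_eq_true, beq_iff_eq]; tauto)]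
        exact mid_row N i hN (by exact_mod_cast fun h => hb.1 (by exact_mod_cast h)) hb.2
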